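-- pv_equiv track=rewrite | github.com/zuspec/zuspec-fe-pss | tests/python/test_helpers.py | generate_components
-- ===== SOURCE A (Python) =====
-- def generate_components(num_components: int, nested: bool = False) -> str:
--     """
--     Generate PSS code with multiple components
--
--     Args:
--         num_components: Number of components to generate
--         nested: If True, create nested component hierarchy
--
--     Returns:
--         PSS source code string
--     """
--     if not nested:
--         lines = []
--         for i in range(num_components):
--             lines.append(f"component C{i} {{")
--             lines.append(f"}}")
--         return "\n".join(lines)
--     else:
--         # Create nested hierarchy
--         lines = []
--         for i in range(num_components):
--             lines.append(f"{'    ' * i}component C{i} {{")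
--         for i in range(num_components - 1, -1, -1):
--             lines.append(f"{'    ' * i}}}")
--         return "\n".join(lines)
-- ===== SOURCE B (Python) =====
-- def generate_components(num_components: int, nested: bool = False) -> str:
--     """Same output as A; different decomposition: one pass with an accumulated
--     indent string and a stack of pending close braces, instead of A's two flat
--     index passes that recompute '    ' * i."""
--     if not nested:
--         return "\n".join(line for i in range(num_components)
--                          for line in (f"component C{i} {{", "}"))
--     indent = ""
--     lines = []
--     closes = []
--     for i in range(num_components):
--         lines.append(f"{indent}component C{i} {{")
--         closes.append(indent + "}")
--         indent += "    "
--     while closes: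
--         lines.append(closes.pop())
--     return "\n".join(lines)
-- ===== Notes on version B (the rewrite author's own statement) =====
-- stated objective: alternative
-- what changed: The nested case is built in a single pass that maintains an accumulated indent string and a stack of pending close-brace lines popped afterwards, replacing A's two flat index passes that each recompute ' ' * i; the non-nested case becomes a flat comprehension joined once.
import Mathlib
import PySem

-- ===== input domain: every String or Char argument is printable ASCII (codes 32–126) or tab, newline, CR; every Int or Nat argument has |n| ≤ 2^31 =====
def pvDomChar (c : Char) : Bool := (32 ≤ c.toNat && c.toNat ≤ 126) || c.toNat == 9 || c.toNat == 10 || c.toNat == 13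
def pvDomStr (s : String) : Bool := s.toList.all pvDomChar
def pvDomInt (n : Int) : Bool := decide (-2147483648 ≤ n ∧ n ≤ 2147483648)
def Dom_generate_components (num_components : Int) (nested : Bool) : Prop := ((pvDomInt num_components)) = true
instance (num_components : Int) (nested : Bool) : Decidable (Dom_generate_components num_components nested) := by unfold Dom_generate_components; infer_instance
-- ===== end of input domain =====

-- B replaces A's two flat index passes (with '    ' * i indentation) for the nested case by a
-- single pass with an accumulated indent and a stack of close braces popped afterwards
-- (objective: alternative decomposition; same cost).

-- ===== PORT A =====
-- Python "s * n" on strings (exact: negative n gives ""):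
def pyStrTimes (s : String) (n : Int) : String := String.ofList (PySem.List.pyRepeat s.toList n)

def generate_components (num_components : Int) (nested : Bool) : String :=
  if !nested then
    let lines := (PySem.List.pyRange 0 num_components 1).foldl
      (fun acc i => (acc ++ ["component C" ++ PySem.Int.toStr i ++ " {"]) ++ ["}"]) []
    PySem.Str.join "\n" lines
  else
    let lines := (PySem.List.pyRange 0 num_components 1).foldl
      (fun acc i => acc ++ [pyStrTimes "    " i ++ ("component C" ++ PySem.Int.toStr i ++ " {")]) []
    let lines2 := (PySem.List.pyRange (num_components - 1) (-1) (-1)).foldl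
      (fun acc i => acc ++ [pyStrTimes "    " i ++ "}"]) lines
    PySem.Str.join "\n" lines2

-- ===== PORT B =====
-- the trailing 'while closes: lines.append(closes.pop())' loop of Source B
def popCloses (lines closes : List String) : List String :=
  if h : closes = [] then lines
  else popCloses (lines ++ [closes.getLast h]) closes.dropLast
termination_by closes.length
decreasing_by
  have := List.length_pos_iff.mpr h
  simp [List.length_dropLast]
  omega

def generate_components_alt (num_components : Int) (nested : Bool) : String :=
  if !nested then
    PySem.Str.join "\n" ((PySem.List.pyRange 0 num_components 1).flatMap
      (fun i => ["component C" ++ PySem.Int.toStr i ++ " {", "}"]))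
  else
    let st := (PySem.List.pyRange 0 num_components 1).foldl
      (fun (st : List String × List String × String) i =>
        (st.1 ++ [st.2.2 ++ ("component C" ++ PySem.Int.toStr i ++ " {")],
         st.2.1 ++ [st.2.2 ++ "}"],
         st.2.2 ++ "    ")) ([], [], "")
    PySem.Str.join "\n" (popCloses st.1 st.2.1)

-- ===== PRECONDITION & SPEC =====
def Spec_generate_components (num_components : Int) (nested : Bool) (out : String) : Prop := out = generate_components_alt num_components nested
instance (num_components : Int) (nested : Bool) (out : String) : Decidable (Spec_generate_components num_components nested out) := by unfold Spec_generate_components; infer_instance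

-- ===== CLAIM (what is proved, stated in full; the proofs are below) =====
def Claim_equal_generate_components : Prop := ∀ (num_components : Int) (nested : Bool), Dom_generate_components num_components nested → Spec_generate_components num_components nested (generate_components num_components nested)

-- ===== LEMMAS AND PROOFS =====

-- proof-only abbreviation for the opening line
def openL (i : Int) : String := "component C" ++ PySem.Int.toStr i ++ " {"

lemma sp_zero : pyStrTimes "    " 0 = "" := by
  simp [pyStrTimes, PySem.List.pyRepeat]

lemma sp_succ' (m : Nat) : pyStrTimes "    " ((m : Int) + 1) = pyStrTimes "    " (m : Int) ++ "    " := by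
  have h : ((m : Int) + 1).toNat = m + 1 := by omega
  rw [pyStrTimes, pyStrTimes, PySem.List.pyRepeat, PySem.List.pyRepeat, h, Int.toNat_natCast,
      List.replicate_succ', List.flatten_append, String.ofList_append]
  simp

lemma popCloses_eq (closes : List String) : ∀ lines, popCloses lines closes = lines ++ closes.reverse := by
  induction closes using List.reverseRecOn with
  | nil => intro lines; rw [popCloses]; simp
  | append_singleton cs c ih =>
    intro lines
    rw [popCloses]
    have h : cs ++ [c] ≠ [] := by simp
    simp [h, ih]

-- B's single pass, characterised: after m steps the state is (open lines, close lines, indent)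
lemma foldl_inv (m : Nat) :
    ((List.range m).map (fun (k : Nat) => (0 : Int) + k)).foldl
      (fun (st : List String × List String × String) i =>
        (st.1 ++ [st.2.2 ++ ("component C" ++ PySem.Int.toStr i ++ " {")],
         st.2.1 ++ [st.2.2 ++ "}"],
         st.2.2 ++ "    ")) ([], [], "")
    = ((List.range m).map (fun (j : Nat) => pyStrTimes "    " (j : Int) ++ openL (j : Int)),
       (List.range m).map (fun (j : Nat) => pyStrTimes "    " (j : Int) ++ "}"),
       pyStrTimes "    " (m : Int)) := by
  induction m with
  | zero => simp [sp_zero]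
  | succ m ih =>
    rw [List.range_succ, List.map_append, List.foldl_append, ih]
    simp only [List.map_cons, List.map_nil, List.foldl_cons, List.foldl_nil]
    have hc : ((m : Int) + 1) = (((m + 1 : Nat)) : Int) := by push_cast; ring
    rw [← hc, sp_succ']
    simp [openL]

-- A's two nested-case passes, characterised the same way (at base 0)
lemma a_nested_lines (n : Int) :
    ((PySem.List.pyRange (n - 1) (-1) (-1)).foldl (fun acc i => acc ++ [pyStrTimes "    " i ++ "}"])
      ((PySem.List.pyRange 0 n 1).foldl
        (fun acc i => acc ++ [pyStrTimes "    " i ++ ("component C" ++ PySem.Int.toStr i ++ " {")]) []))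
    = (List.range n.toNat).map (fun (j : Nat) => pyStrTimes "    " (j : Int) ++ openL (j : Int)) ++
      (List.range n.toNat).reverse.map (fun (j : Nat) => pyStrTimes "    " (j : Int) ++ "}") := by
  rw [PySem.List.foldl_append_singleton_eq_map, PySem.List.foldl_append_singleton_eq_map]
  have hrev : PySem.List.pyRange (n - 1) (-1) (-1) = (PySem.List.pyRange 0 n 1).reverse := by
    have := PySem.List.pyRange_neg_one_eq_reverse (n - 1) (-1)
    simpa using this
  rw [hrev, PySem.List.pyRange_one 0 n, List.map_reverse, List.map_map, List.map_map]
  simp only [List.nil_append, sub_zero]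
  congr 1
  · apply List.map_congr_left
    intro j _
    simp [openL, Function.comp]
  · rw [List.map_reverse]
    congr 1
    apply List.map_congr_left
    intro j _
    simp [Function.comp]

-- A's non-nested loop (two appends per step) as a flatMap
lemma foldl_pairs (f g : Int → String) (l : List Int) : ∀ acc,
    l.foldl (fun a i => (a ++ [f i]) ++ [g i]) acc = acc ++ l.flatMap (fun i => [f i, g i]) := by
  induction l with
  | nil => intro acc; simp
  | cons x xs ih => intro acc; simp [List.append_assoc, List.flatMap_def]

-- ===== VERDICT (by name: the statement is the Claim_ definition above) =====
theorem generate_components_spec : Claim_equal_generate_components := by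
  unfold Claim_equal_generate_components
  intro n nested _
  unfold Spec_generate_components
  cases nested with
  | false =>
    simp only [generate_components, generate_components_alt, Bool.not_false, if_pos]
    rw [foldl_pairs (fun i => "component C" ++ PySem.Int.toStr i ++ " {") (fun _ => "}")]
    simp
  | true =>
    simp only [generate_components, generate_components_alt, Bool.not_true, Bool.false_eq_true,
      if_false]
    congr 1
    rw [a_nested_lines]
    have hr : PySem.List.pyRange 0 n 1 = (List.range n.toNat).map (fun (k : Nat) => (0 : Int) + k) := by
      simpa using PySem.List.pyRange_one 0 n
    rw [hr, foldl_inv n.toNat, popCloses_eq]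
    simp [List.map_reverse]
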